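-- pv_equiv track=rewrite | github.com/vanHavel/AdventOfCode2021 | days/day3.py | part1
-- ===== SOURCE A (Python) =====
-- def part1(data: str) -> str:
--     lines = data.splitlines()
--     reps = [list(l) for l in lines]
--     d = len(reps[0])
--     ones = [sum([1 if l[i] == '1' else 0  for l in reps]) for i in range(d)]
--     zeros = [sum([0 if l[i] == '1' else 1 for l in reps]) for i in range(d)]
--     bin = 1
--     res = 0
--     for i in range(d-1, -1, -1):
--         if ones[i] > zeros[i]:
--             res += bin
--         bin *= 2
--     return str(res * (bin - 1 - res))
-- ===== SOURCE B (Python) =====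
-- def part1(data: str) -> str:
--     # gamma's bit for a column is the lower median of the column's 0/1 values
--     # (sort the column, pick index (n-1)//2) -- selection instead of counting.
--     lines = data.splitlines()
--     half = (len(lines) - 1) // 2
--     bits = [sorted(1 if c == '1' else 0 for c in col)[half] for col in zip(*lines)]
--     g = 0
--     for b in bits:
--         g = 2 * g + b
--     return str(g * ((1 << len(bits)) - 1 - g))
-- ===== Notes on version B (the rewrite author's own statement) =====
-- stated objective: alternative
-- what changed: B computes each gamma bit by selection instead of counting: it sorts the column's 0/1 values and takes the lower median at index (n-1)//2 (equal to A's strict-majority test), then assembles the result with one Horner pass and a mask complement, replacing A's ones/zeros counting comprehensions and reverse power-of-two loop.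
import Mathlib
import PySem

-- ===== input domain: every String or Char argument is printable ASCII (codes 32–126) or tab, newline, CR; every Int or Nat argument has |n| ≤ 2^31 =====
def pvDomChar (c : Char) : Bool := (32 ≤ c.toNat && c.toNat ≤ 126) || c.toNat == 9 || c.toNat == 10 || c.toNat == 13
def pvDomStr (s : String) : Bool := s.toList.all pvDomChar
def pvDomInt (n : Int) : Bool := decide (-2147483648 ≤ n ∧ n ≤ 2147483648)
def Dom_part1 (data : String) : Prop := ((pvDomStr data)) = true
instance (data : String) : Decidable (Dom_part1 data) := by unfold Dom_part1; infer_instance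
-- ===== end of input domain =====

-- B finds each gamma bit by selection (sort the column's 0/1 values, take the lower median
-- at index (n-1)//2) instead of A's ones/zeros counting and reverse power-of-two loop
-- (alternative algorithm; return-value equivalence only, neither mutates its argument).

-- ===== PORT A =====
def part1 (data : String) : String :=
  let lines := PySem.Str.splitlines data
  let reps := lines.map String.toList
  let d := (reps.headD []).length         -- reps[0]: Pre_ guarantees reps ≠ []
  let ones := (List.range d).map (fun (i : ℕ) =>
    (reps.map (fun l => if PySem.List.pyGet? l (i : Int) = some '1' then (1 : Int) else 0)).sum)
  let zeros := (List.range d).map (fun (i : ℕ) =>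
    (reps.map (fun l => if PySem.List.pyGet? l (i : Int) = some '1' then (0 : Int) else 1)).sum)
  let p := (PySem.List.pyRange ((d : Int) - 1) (-1) (-1)).foldl
    (fun (st : Int × Int) i =>
      (st.1 * 2,
       if PySem.List.pyGetD ones i 0 > PySem.List.pyGetD zeros i 0 then st.2 + st.1 else st.2))
    (1, 0)
  PySem.Int.toStr (p.2 * (p.1 - 1 - p.2))

-- ===== PORT B =====
-- zip(*lines): columns up to the shortest line (empty when there are no lines).
-- Structural port: the first line empties after exactly its length steps, so its length is an
-- exact fuel bound for zip's loop (the isEmpty test stops earlier when another line is shorter).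
def pvZipGo : ℕ → List (List Char) → List (List Char)
  | 0, _ => []
  | f + 1, ls =>
    if ls.any List.isEmpty = true then []
    else (ls.map (fun l => l.headD ' ')) :: pvZipGo f (ls.map List.tail)

def pvZip (ls : List (List Char)) : List (List Char) := pvZipGo (ls.headD []).length ls

def part1_alt (data : String) : String :=
  let lines := (PySem.Str.splitlines data).map String.toList
  let half := PySem.Int.floordiv ((lines.length : Int) - 1) 2
  -- sorted(...)[half]: every column has length len(lines) ≥ 1, and 0 ≤ half < len(lines),
  -- so the index is always in range and the .getD 0 default is never consulted.
  let bits := (pvZip lines).map (fun col =>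
    (PySem.List.pyGet?
      (PySem.List.sorted (col.map (fun c => if c = '1' then (1 : Int) else 0)) (fun x => x) false)
      half).getD 0)
  let g := bits.foldl (fun a b => 2 * a + b) 0
  PySem.Int.toStr (g * (2 ^ bits.length - 1 - g))

-- ===== PRECONDITION & SPEC =====
-- Pre_ is exactly where A returns: at least one line (else reps[0] raises IndexError) and no
-- line shorter than the first (else l[i] raises IndexError).
def Pre_part1 (data : String) : Prop :=
  PySem.Str.splitlines data ≠ [] ∧
  ∀ l ∈ PySem.Str.splitlines data,
    (((PySem.Str.splitlines data).headD "").toList).length ≤ l.toList.length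

instance (data : String) : Decidable (Pre_part1 data) := by unfold Pre_part1; infer_instance

def pvWitness_part1 : String := "01\n10"

def Spec_part1 (data : String) (out : String) : Prop := out = part1_alt data
instance (data : String) (out : String) : Decidable (Spec_part1 data out) := by unfold Spec_part1; infer_instance

-- ===== CLAIM (what is proved, stated in full; the proofs are below) =====
def Claim_equal_part1 : Prop := ∀ (data : String), Dom_part1 data → Pre_part1 data → Spec_part1 data (part1 data)

-- ===== LEMMAS AND PROOFS =====

-- the per-column majority bit: column j of reps has more '1's than other characters
def pvBit (reps : List (List Char)) (j : ℕ) : Bool :=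
  decide ((reps.map (fun l => l.getD j ' ')).count '1' * 2 > reps.length)

-- gamma of the first d columns, as a Horner value
def pvG (g : ℕ → Bool) : ℕ → Int
  | 0 => 0
  | d+1 => pvG g d * 2 + (if g d then 1 else 0)

theorem headD_eq_getD_zero (l : List Char) : l.headD ' ' = l.getD 0 ' ' := by
  cases l <;> rfl

theorem tail_getD (l : List Char) (i : ℕ) : l.tail.getD i ' ' = l.getD (i+1) ' ' := by
  cases l <;> rfl

theorem pvZipGo_eq : ∀ (d : ℕ) (ls : List (List Char)), (∀ l ∈ ls, d ≤ l.length) →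
    pvZipGo d ls = (List.range d).map (fun i => ls.map (fun l => l.getD i ' ')) := by
  intro d
  induction d with
  | zero => intro ls _; simp [pvZipGo]
  | succ d ih =>
    intro ls hlen
    have hne : ls.any List.isEmpty = false := by
      simp only [List.any_eq_false]
      intro l hl
      have := hlen l hl
      cases l with
      | nil => simp at this
      | cons a t => simp
    rw [pvZipGo, hne]
    simp only [Bool.false_eq_true, if_false]
    rw [ih (ls.map List.tail) (by
      intro l hl
      simp only [List.mem_map] at hl
      obtain ⟨l', hl', rfl⟩ := hl
      have := hlen l' hl'
      cases l' <;> simp_all)]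
    rw [List.range_succ_eq_map]
    simp only [List.map_cons, List.map_map]
    refine congrArg₂ List.cons (List.map_congr_left (fun l _ => headD_eq_getD_zero l)) ?_
    apply List.map_congr_left
    intro i _
    simp only [Function.comp]
    exact List.map_congr_left (fun l _ => tail_getD l i)

theorem pvZip_eq (d : ℕ) (ls : List (List Char)) (h0 : (ls.headD []).length = d)
    (hlen : ∀ l ∈ ls, d ≤ l.length) :
    pvZip ls = (List.range d).map (fun i => ls.map (fun l => l.getD i ' ')) := by
  rw [pvZip, h0]; exact pvZipGo_eq d ls hlen

-- the column's 0/1 values are a rearrangement of (count '0's) zeros followed by (count '1's) ones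
theorem pv_map_perm (col : List Char) :
    (col.map (fun c => if c = '1' then (1 : Int) else 0)).Perm
      (List.replicate (col.length - col.count '1') 0 ++ List.replicate (col.count '1') 1) := by
  induction col with
  | nil => simp
  | cons a t ih =>
    have hcle := List.count_le_length (l := t) (a := '1')
    by_cases h : a = '1'
    · have hc : (a :: t).count '1' = t.count '1' + 1 := by simp [h]
      simp only [List.length_cons, hc]
      have hz : t.length + 1 - (t.count '1' + 1) = t.length - t.count '1' := by omega
      rw [hz, List.replicate_succ]
      simp only [List.map_cons, h]
      exact (List.Perm.cons 1 ih).trans List.perm_middle.symm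
    · have hc : (a :: t).count '1' = t.count '1' := by simp [h]
      simp only [List.length_cons, hc]
      have hz : t.length + 1 - t.count '1' = (t.length - t.count '1') + 1 := by omega
      rw [hz, List.replicate_succ, List.cons_append]
      simp only [List.map_cons, if_neg h]
      exact List.Perm.cons 0 ih

theorem pv_sorted_eq (col : List Char) :
    PySem.List.sorted (col.map (fun c => if c = '1' then (1 : Int) else 0)) (fun x => x) false
      = List.replicate (col.length - col.count '1') 0 ++ List.replicate (col.count '1') 1 := by
  apply PySem.List.sorted_id_eq_of_perm_of_pairwise
  · exact (pv_map_perm col).symm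
  · apply List.pairwise_append.mpr
    refine ⟨List.pairwise_replicate.mpr (Or.inr (le_refl 0)),
      List.pairwise_replicate.mpr (Or.inr (le_refl 1)), ?_⟩
    intro a ha b hb
    rw [List.eq_of_mem_replicate ha, List.eq_of_mem_replicate hb]
    norm_num

-- the lower median of the sorted 0/1 column is 1 exactly when the '1's are a strict majority
theorem pv_median (col : List Char) (h : col ≠ []) :
    (PySem.List.pyGet?
        (PySem.List.sorted (col.map (fun c => if c = '1' then (1 : Int) else 0)) (fun x => x) false)
        (PySem.Int.floordiv ((col.length : Int) - 1) 2)).getD 0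
      = if col.count '1' * 2 > col.length then 1 else 0 := by
  have hn : 1 ≤ col.length := List.length_pos_iff.mpr h
  have hc : col.count '1' ≤ col.length := List.count_le_length
  rw [pv_sorted_eq]
  set n := col.length with hndef
  set c := col.count '1' with hcdef
  have hcast : (n : Int) - 1 = ((n - 1 : ℕ) : Int) := by omega
  have hfd : PySem.Int.floordiv ((n : Int) - 1) 2 = (((n - 1) / 2 : ℕ) : Int) := by
    rw [hcast]; exact_mod_cast PySem.Int.floordiv_natCast (n - 1) 2
  rw [hfd, PySem.List.pyGet?_natCast]
  set k := (n - 1) / 2 with hkdef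
  have hk : k < n := by omega
  by_cases hbig : c * 2 > n
  · have hkz : ¬ k < n - c := by omega
    rw [List.getElem?_append_right (by simp; omega)]
    simp only [List.length_replicate, List.getElem?_replicate]
    rw [if_pos (by omega), if_pos hbig]
    rfl
  · have hkz : k < n - c := by omega
    rw [List.getElem?_append_left (by simp; omega)]
    simp only [List.getElem?_replicate]
    rw [if_pos hkz, if_neg hbig]
    rfl

-- Horner accumulation of the bit list
theorem pvHorner (g : ℕ → Bool) : ∀ (d : ℕ) (g0 : Int),
    ((List.range d).map (fun i => if g i then (1 : Int) else 0)).foldl (fun a b => 2 * a + b) g0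
      = g0 * 2 ^ d + pvG g d := by
  intro d
  induction d with
  | zero => intro g0; simp [pvG]
  | succ d ih =>
    intro g0
    rw [List.range_succ, List.map_append, List.foldl_append, ih]
    simp only [List.map_cons, List.map_nil, List.foldl_cons, List.foldl_nil, pvG, pow_succ]
    ring

-- A's reverse loop accumulates the same Horner value times the running power of two
theorem pvA_fold (g : ℕ → Bool) (step : Int × Int → ℕ → Int × Int)
    (hstep : ∀ st k, step st k = (st.1 * 2, if g k then st.2 + st.1 else st.2)) :
    ∀ (d : ℕ) (bin res : Int),
      (List.range d).foldl (fun st k => step st (d - 1 - k)) (bin, res)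
        = (bin * 2 ^ d, res + bin * pvG g d) := by
  intro d
  induction d with
  | zero => intro bin res; simp [pvG]
  | succ d ih =>
    intro bin res
    rw [List.range_succ_eq_map, List.foldl_cons, List.foldl_map]
    have h0 : step (bin, res) (d + 1 - 1 - 0) = (bin * 2, if g d then res + bin else res) := by
      rw [hstep]; norm_num
    rw [h0]
    have hfun : ∀ (st : Int × Int) (k : ℕ), k ∈ List.range d →
        step st (d + 1 - 1 - (k + 1)) = step st (d - 1 - k) := by
      intro st k hk
      congr 1
      omega
    rw [PySem.List.foldl_congr_mem _ _ _ _ (fun st k hk => hfun st k hk)]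
    rw [ih]
    by_cases h : g d <;> simp only [h, if_true, if_false, pvG, pow_succ,
      Bool.false_eq_true] <;> rw [Prod.mk.injEq] <;> exact ⟨by ring, by ring⟩

theorem ones_sum (L : List (List Char)) (j : ℕ) (hj : ∀ l ∈ L, j < l.length) :
    (L.map (fun l => if PySem.List.pyGet? l (j : Int) = some '1' then (1 : Int) else 0)).sum
      = ((L.map (fun l => l.getD j ' ')).count '1' : ℕ) := by
  induction L with
  | nil => simp
  | cons a t ih =>
    have hlt : j < a.length := hj a List.mem_cons_self
    have ha : PySem.List.pyGet? a (j : Int) = some (a.getD j ' ') := by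
      rw [PySem.List.pyGet?_natCast, List.getElem?_eq_getElem hlt,
        List.getD_eq_getElem a ' ' hlt]
    simp only [List.map_cons, List.sum_cons, List.count_cons, ha]
    rw [ih (fun l hl => hj l (List.mem_cons_of_mem a hl))]
    simp only [Option.some.injEq]
    by_cases h : a.getD j ' ' = '1'
    · rw [if_pos h, if_pos (beq_iff_eq.mpr h)]; push_cast; ring
    · rw [if_neg h, if_neg (fun hb => h (beq_iff_eq.mp hb))]; push_cast; ring

theorem zeros_sum (L : List (List Char)) (j : ℕ) (hj : ∀ l ∈ L, j < l.length) :
    (L.map (fun l => if PySem.List.pyGet? l (j : Int) = some '1' then (0 : Int) else 1)).sum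
      = (L.length : Int) - ((L.map (fun l => l.getD j ' ')).count '1' : ℕ) := by
  induction L with
  | nil => simp
  | cons a t ih =>
    have hlt : j < a.length := hj a List.mem_cons_self
    have ha : PySem.List.pyGet? a (j : Int) = some (a.getD j ' ') := by
      rw [PySem.List.pyGet?_natCast, List.getElem?_eq_getElem hlt,
        List.getD_eq_getElem a ' ' hlt]
    simp only [List.map_cons, List.sum_cons, List.count_cons, List.length_cons, ha]
    rw [ih (fun l hl => hj l (List.mem_cons_of_mem a hl))]
    simp only [Option.some.injEq]
    by_cases h : a.getD j ' ' = '1'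
    · rw [if_pos h, if_pos (beq_iff_eq.mpr h)]; push_cast; ring
    · rw [if_neg h, if_neg (fun hb => h (beq_iff_eq.mp hb))]; push_cast; ring

theorem pv_core (L : List (List Char)) (hne : L ≠ [])
    (hlen : ∀ l ∈ L, (L.headD []).length ≤ l.length) :
    (let d := (L.headD []).length
     let ones := (List.range d).map (fun (i : ℕ) =>
       (L.map (fun l => if PySem.List.pyGet? l (i : Int) = some '1' then (1 : Int) else 0)).sum)
     let zeros := (List.range d).map (fun (i : ℕ) =>
       (L.map (fun l => if PySem.List.pyGet? l (i : Int) = some '1' then (0 : Int) else 1)).sum)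
     let p := (PySem.List.pyRange ((d : Int) - 1) (-1) (-1)).foldl
       (fun (st : Int × Int) i =>
         (st.1 * 2,
          if PySem.List.pyGetD ones i 0 > PySem.List.pyGetD zeros i 0 then st.2 + st.1 else st.2))
       (1, 0)
     p.2 * (p.1 - 1 - p.2)) =
    (let half := PySem.Int.floordiv ((L.length : Int) - 1) 2
     let bits := (pvZip L).map (fun col =>
       (PySem.List.pyGet?
         (PySem.List.sorted (col.map (fun c => if c = '1' then (1 : Int) else 0)) (fun x => x) false)
         half).getD 0)
     let g := bits.foldl (fun a b => 2 * a + b) 0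
     g * (2 ^ bits.length - 1 - g)) := by
  simp only []
  set d := (L.headD []).length with hd
  -- B side: each column's median is the majority bit, then Horner
  rw [pvZip_eq d L rfl hlen, List.map_map]
  have hcolbit : ∀ i ∈ List.range d,
      ((fun col =>
        (PySem.List.pyGet?
          (PySem.List.sorted (col.map (fun c => if c = '1' then (1 : Int) else 0)) (fun x => x) false)
          (PySem.Int.floordiv ((L.length : Int) - 1) 2)).getD 0) ∘
       (fun i => L.map (fun l => l.getD i ' '))) i
      = if pvBit L i then (1 : Int) else 0 := by
    intro i _
    simp only [Function.comp]
    have hcne : L.map (fun l => l.getD i ' ') ≠ [] :=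
      fun hmap => hne (List.map_eq_nil_iff.mp hmap)
    have := pv_median (L.map (fun l => l.getD i ' ')) hcne
    rw [List.length_map] at this
    rw [this]
    simp only [pvBit]
    by_cases hb : (L.map (fun l => l.getD i ' ')).count '1' * 2 > L.length
    · rw [if_pos hb, if_pos (by simpa using hb)]
    · rw [if_neg hb, if_neg (by simpa using hb)]
  rw [List.map_congr_left hcolbit, pvHorner (pvBit L) d 0, List.length_map, List.length_range]
  -- A side: the countdown range as a mapped List.range
  have hrange : PySem.List.pyRange ((d : Int) - 1) (-1) (-1)
      = (List.range d).map (fun (k : ℕ) => (d : Int) - 1 - (k : Int)) := by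
    rw [PySem.List.pyRange_neg_one]
    have h1 : (((d : Int) - 1) - (-1)).toNat = d := by omega
    rw [h1]
  rw [hrange, List.foldl_map]
  have hcong : ∀ (st : Int × Int) (k : ℕ), k ∈ List.range d →
      (st.1 * 2,
        if PySem.List.pyGetD ((List.range d).map (fun (i : ℕ) =>
            (L.map (fun l => if PySem.List.pyGet? l (i : Int) = some '1' then (1 : Int) else 0)).sum))
            ((d : Int) - 1 - k) 0 >
          PySem.List.pyGetD ((List.range d).map (fun (i : ℕ) =>
            (L.map (fun l => if PySem.List.pyGet? l (i : Int) = some '1' then (0 : Int) else 1)).sum))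
            ((d : Int) - 1 - k) 0
        then st.2 + st.1 else st.2)
      = (st.1 * 2, if pvBit L (d - 1 - k) = true then st.2 + st.1 else st.2) := by
    intro st k hk
    rw [List.mem_range] at hk
    have hji : (d : Int) - 1 - (k : Int) = ((d - 1 - k : ℕ) : Int) := by omega
    set j := d - 1 - k with hjdef
    have hjd : j < d := by omega
    have hjl : ∀ l ∈ L, j < l.length := fun l hl => lt_of_lt_of_le hjd (hlen l hl)
    rw [hji, PySem.List.pyGetD_natCast, PySem.List.pyGetD_natCast,
      PySem.List.getD_map_range _ _ _ _ hjd, PySem.List.getD_map_range _ _ _ _ hjd,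
      ones_sum L j hjl, zeros_sum L j hjl]
    congr 1
    set c := (L.map (fun l => l.getD j ' ')).count '1' with hc
    by_cases hb : c * 2 > L.length
    · rw [if_pos (by omega),
        if_pos (by simp only [pvBit, ← hc, decide_eq_true_eq]; exact hb)]
    · rw [if_neg (by omega),
        if_neg (by simp only [pvBit, ← hc, decide_eq_true_eq]; exact hb)]
  rw [PySem.List.foldl_congr_mem _ _ _ _ (fun st k hk => hcong st k hk)]
  rw [pvA_fold (pvBit L) _ (fun st k => rfl) d 1 0]
  ring

-- ===== VERDICT (by name: the statements are the Claim_ definitions above) =====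
theorem part1_spec : Claim_equal_part1 := by
  intro data _ hPre
  obtain ⟨hne, hlenS⟩ := hPre
  unfold Spec_part1 part1 part1_alt
  simp only []
  refine congrArg PySem.Int.toStr ?_
  have hLne : (PySem.Str.splitlines data).map String.toList ≠ [] :=
    fun hmap => hne (List.map_eq_nil_iff.mp hmap)
  rw [List.length_map]
  have := pv_core ((PySem.Str.splitlines data).map String.toList) hLne ?side
  · rw [List.length_map] at this
    exact this
  · intro l hl
    rw [List.mem_map] at hl
    obtain ⟨s, hs, rfl⟩ := hl
    have hh : ((PySem.Str.splitlines data).map String.toList).headD []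
        = ((PySem.Str.splitlines data).headD "").toList := by
      cases h : PySem.Str.splitlines data with
      | nil => exact absurd h hne
      | cons a t => rfl
    rw [hh]
    exact hlenS s hs
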